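-- pv_equiv track=rewrite | github.com/AnawinA/IT_encoder | it_encode_lib/from_ijudge/meal_encoding.py | meal_decode
-- ===== SOURCE A (Python) =====
-- def meal_decode(text: str) -> str:
--     """Meal decoding"""
--     middle_str = len(text) // 2
--     t1, t2 = text[:middle_str], text[middle_str:]
--     clean_text = ""
--     for i, v in enumerate(t1):
--         clean_text += t2[i] + v
--     if len(t2) > len(t1):
--         clean_text += t2[-1]
--     return clean_text
-- ===== SOURCE B (Python) =====
-- def meal_decode(text: str) -> str:
--     """Meal decoding"""
--     middle = len(text) // 2
--     t1, t2 = text[:middle], text[middle:]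
--     res = [''] * len(text)
--     res[0::2] = t2
--     res[1::2] = t1
--     return ''.join(res)
-- ===== Notes on version B (the rewrite author's own statement) =====
-- stated objective: faster
-- what changed: Replaces the per-character accumulation loop and the trailing-odd-character branch with strided slice assignment into a preallocated list (res[0::2]=t2, res[1::2]=t1) joined once.
import Mathlib
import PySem

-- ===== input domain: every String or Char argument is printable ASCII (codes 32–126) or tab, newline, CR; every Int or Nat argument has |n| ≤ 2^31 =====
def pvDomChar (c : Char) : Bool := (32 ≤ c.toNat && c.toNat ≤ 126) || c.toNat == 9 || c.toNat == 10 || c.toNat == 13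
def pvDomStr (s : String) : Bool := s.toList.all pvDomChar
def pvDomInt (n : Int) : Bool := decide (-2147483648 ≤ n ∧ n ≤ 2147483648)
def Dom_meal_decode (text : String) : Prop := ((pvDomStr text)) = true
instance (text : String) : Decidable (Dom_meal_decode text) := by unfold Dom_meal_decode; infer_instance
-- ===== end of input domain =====

-- B replaces A's per-character accumulation loop and trailing-odd-character branch by a strided
-- reconstruction (even slots from t2, odd slots from t1); return value only, no side effects.

-- ===== PORT A =====
-- literal transliteration of A: split at len//2, fold over enumerate(t1) appending t2[i] + v,
-- then append t2[-1] when t2 is longer. t2[i] is always in range (i < len t1 ≤ len t2), so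
-- pyGetD's default is never used; likewise t2[-1] only when t2 ≠ [].
def meal_decode (text : String) : String :=
  let cs := text.toList
  let middle := PySem.Int.floordiv cs.length 2
  let t1 := PySem.List.slice cs none (some middle)
  let t2 := PySem.List.slice cs (some middle) none
  let clean := (PySem.List.enumerate t1 0).foldl
    (fun acc p => acc ++ [PySem.List.pyGetD t2 p.1 ' ', p.2]) []
  let clean := if t2.length > t1.length then clean ++ [PySem.List.pyGetD t2 (-1) ' '] else clean
  String.ofList clean

-- ===== PORT B =====
-- weave xs ys places xs at even result positions and ys at odd ones (= res[0::2] = xs; res[1::2] = ys)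
def weave : List Char → List Char → List Char
  | [], ys => ys
  | x :: xs, ys => x :: weave ys xs
termination_by xs ys => xs.length + ys.length
decreasing_by simp; omega

def meal_decode_alt (text : String) : String :=
  let cs := text.toList
  let middle := PySem.Int.floordiv cs.length 2
  let t1 := PySem.List.slice cs none (some middle)
  let t2 := PySem.List.slice cs (some middle) none
  String.ofList (weave t2 t1)

-- ===== PRECONDITION & SPEC =====
def Spec_meal_decode (text : String) (out : String) : Prop := out = meal_decode_alt text
instance (text : String) (out : String) : Decidable (Spec_meal_decode text out) := by unfold Spec_meal_decode; infer_instance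

-- ===== CLAIM (what is proved, stated in full; the proofs are below) =====
def Claim_equal_meal_decode : Prop := ∀ (text : String), Dom_meal_decode text → Spec_meal_decode text (meal_decode text)

-- ===== LEMMAS AND PROOFS =====

-- A's fold, characterised: from start index s it interleaves t2.drop s with t1.
lemma meal_fold_eq (t1 : List Char) : ∀ (s : Nat) (t2 : List Char) (acc : List Char),
    s + t1.length ≤ t2.length →
    (PySem.List.enumerate t1 (s : Int)).foldl
      (fun acc p => acc ++ [PySem.List.pyGetD t2 p.1 ' ', p.2]) acc
    = acc ++ ((t2.drop s).zip t1).flatMap (fun p => [p.1, p.2]) := by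
  induction t1 with
  | nil => intro s t2 acc _; simp [PySem.List.enumerate]
  | cons v t1' ih =>
    intro s t2 acc h
    rw [PySem.List.enumerate_cons]
    simp only [List.foldl_cons]
    have hs : s < t2.length := by simp at h; omega
    have hdrop : t2.drop s = t2[s] :: t2.drop (s + 1) := by
      rw [List.drop_eq_getElem_cons hs]
    have : ((s : Int) + 1) = ((s + 1 : Nat) : Int) := by push_cast; ring
    rw [this, ih (s + 1) t2 _ (by simp at h ⊢; omega)]
    rw [PySem.List.pyGetD_natCast, hdrop]
    simp only [List.zip_cons_cons, List.flatMap_cons, List.append_assoc]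
    congr 2
    simp [List.getD_eq_getElem?_getD, hs]

-- B's weave, characterised the same way (for the length shapes the split produces).
lemma weave_eq (t1 : List Char) : ∀ (t2 : List Char),
    t1.length ≤ t2.length → t2.length ≤ t1.length + 1 →
    weave t2 t1 = (t2.zip t1).flatMap (fun p => [p.1, p.2]) ++ t2.drop t1.length := by
  induction t1 with
  | nil =>
    intro t2 _ _
    cases t2 with
    | nil => simp [weave]
    | cons a t2' => simp [weave]
  | cons b t1' ih =>
    intro t2 h1 h2
    cases t2 with
    | nil => simp at h1
    | cons a t2' =>
      rw [weave, weave]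
      simp only [List.zip_cons_cons, List.flatMap_cons, List.length_cons, List.drop_succ_cons]
      rw [ih t2' (by simpa using h1) (by simpa using h2)]
      simp

theorem meal_decode_spec : Claim_equal_meal_decode := by
  intro text _
  unfold Spec_meal_decode meal_decode meal_decode_alt
  simp only []
  set cs := text.toList with hcs
  have hmid : PySem.Int.floordiv (cs.length : Int) 2 = ((cs.length / 2 : Nat) : Int) := by
    exact_mod_cast PySem.Int.floordiv_natCast cs.length 2
  rw [hmid, PySem.List.slice_to_natCast, PySem.List.slice_from_natCast]
  set m := cs.length / 2 with hm
  set t1 := cs.take m with ht1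
  set t2 := cs.drop m with ht2
  have hl1 : t1.length = m := by simp [ht1, hm]; omega
  have hl2 : t2.length = cs.length - m := by simp [ht2]
  have hle : t1.length ≤ t2.length := by omega
  have hle2 : t2.length ≤ t1.length + 1 := by
    rw [hl1, hl2, hm]; omega
  congr 1
  have hA : (PySem.List.enumerate t1).foldl
      (fun acc p => acc ++ [PySem.List.pyGetD t2 p.1 ' ', p.2]) []
      = (t2.zip t1).flatMap (fun p => [p.1, p.2]) := by
    have h := meal_fold_eq t1 0 t2 [] (by omega)
    simpa using h
  rw [hA, weave_eq t1 t2 hle hle2]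
  by_cases hgt : t2.length > t1.length
  · have hne : t2 ≠ [] := by intro h; rw [h] at hgt; simp at hgt
    rw [if_pos hgt, PySem.List.pyGetD_neg_one t2 ' ' hne]
    have : t2.drop t1.length = [t2.getLast hne] := by
      have hlen : t2.length = t1.length + 1 := by omega
      rw [List.getLast_eq_getElem]
      rw [List.drop_eq_getElem_cons (by omega)]
      congr 1
      · congr 1; omega
      · rw [List.drop_eq_nil_iff]; omega
    rw [this]
  · rw [if_neg hgt]
    have : t2.drop t1.length = [] := by rw [List.drop_eq_nil_iff]; omega
    rw [this, List.append_nil]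

-- ===== VERDICT (by name: the statement is the Claim_ definition above) =====
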